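-- pv_equiv track=rewrite | github.com/WWz33/pgkit | src/kaks.py | back_translate
-- ===== SOURCE A (Python) =====
-- def back_translate(protein_alignment, cds_dict):
--     """Back-translate protein alignment to CDS alignment"""
--     cds_alignment = {}
--
--     for gene_id, prot_seq in protein_alignment.items():
--         if gene_id not in cds_dict:
--             continue
--
--         cds_seq = cds_dict[gene_id]
--         aligned_cds = []
--         cds_pos = 0
--
--         for aa in prot_seq:
--             if aa == '-':
--                 aligned_cds.append('---')
--             elif cds_pos + 3 <= len(cds_seq):
--                 aligned_cds.append(cds_seq[cds_pos:cds_pos+3])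
--                 cds_pos += 3
--             else:
--                 aligned_cds.append('---')
--
--         cds_alignment[gene_id] = ''.join(aligned_cds)
--
--     return cds_alignment
-- ===== SOURCE B (Python) =====
-- def back_translate(protein_alignment, cds_dict):
--     """Back-translate protein alignment to CDS alignment.
--
--     Run-based algorithm: split the protein row on '-' into gap-free runs,
--     slice one whole multi-codon block of the CDS per run (capped at the
--     number of full codons), pad exhausted residues with '---', and rejoin
--     the runs with '---' for each gap.
--     """
--     cds_alignment = {}
--     for gene_id, prot_seq in protein_alignment.items():
--         if gene_id not in cds_dict:
--             continue
--         cds_seq = cds_dict[gene_id]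
--         n = len(cds_seq) // 3
--         used = 0
--         parts = []
--         for seg in prot_seq.split('-'):
--             take = min(len(seg), n - used)
--             parts.append(cds_seq[3 * used: 3 * (used + take)] + '---' * (len(seg) - take))
--             used += take
--         cds_alignment[gene_id] = '---'.join(parts)
--     return cds_alignment
-- ===== Notes on version B (the rewrite author's own statement) =====
-- stated objective: alternative
-- what changed: B splits the protein row on '-' into gap-free runs and slices one whole multi-codon block of the CDS per run (padding exhausted residues and rejoining runs with '---'), replacing A's per-residue loop that tests and advances a codon position character by character.
import Mathlib
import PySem

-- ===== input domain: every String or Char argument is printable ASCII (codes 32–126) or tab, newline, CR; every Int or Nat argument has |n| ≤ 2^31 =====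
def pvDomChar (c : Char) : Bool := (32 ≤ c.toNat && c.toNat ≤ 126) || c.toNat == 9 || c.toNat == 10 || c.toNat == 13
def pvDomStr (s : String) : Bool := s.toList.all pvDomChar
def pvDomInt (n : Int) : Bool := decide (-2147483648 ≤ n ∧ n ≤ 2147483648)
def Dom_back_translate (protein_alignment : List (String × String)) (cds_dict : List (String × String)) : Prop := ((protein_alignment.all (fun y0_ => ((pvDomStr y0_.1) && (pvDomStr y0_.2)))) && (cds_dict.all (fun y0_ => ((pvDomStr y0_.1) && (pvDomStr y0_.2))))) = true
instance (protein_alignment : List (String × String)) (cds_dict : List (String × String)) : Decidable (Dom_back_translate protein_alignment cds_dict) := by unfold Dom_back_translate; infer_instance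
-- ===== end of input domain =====

-- B replaces A's per-residue loop (codon position advanced character by character) with a run-based
-- algorithm: split the protein row on '-', slice one whole multi-codon block per gap-free run,
-- rejoin with '---' per gap (alternative decomposition; same asymptotic cost).

-- ===== PORT A =====
-- inner 'for aa in prot_seq' loop of A: pieces list + running cds position
def btA_inner (cds : List Char) : List Char → Int → List (List Char)
  | [], _ => []
  | aa :: rest, pos =>
    if aa = '-' then ['-', '-', '-'] :: btA_inner cds rest pos
    else if pos + 3 ≤ (cds.length : Int) then
      PySem.List.slice cds (some pos) (some (pos + 3)) :: btA_inner cds rest (pos + 3)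
    else ['-', '-', '-'] :: btA_inner cds rest pos

def back_translate (protein_alignment : List (String × String)) (cds_dict : List (String × String)) : List (String × String) :=
  (protein_alignment.foldl (fun (acc : PySem.Dict String String) p =>
      match (PySem.Dict.ofList cds_dict).get? p.1 with
      | none => acc
      | some cds_seq =>
        acc.insert p.1 (String.ofList (PySem.Chars.join [] (btA_inner cds_seq.toList p.2.toList 0))))
    PySem.Dict.empty).items

-- ===== PORT B =====
-- inner 'for seg in prot_seq.split('-')' loop of B: one part per gap-free run,
-- slicing min(len(seg), n - used) whole codons from the CDS and padding the rest with '---'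
def btB_runs (cds : List Char) (n : Nat) : List (List Char) → Nat → List (List Char)
  | [], _ => []
  | seg :: rest, used =>
    (PySem.List.slice cds (some ((3 * used : Nat) : Int))
        (some ((3 * (used + min seg.length (n - used)) : Nat) : Int))
      ++ (List.replicate (seg.length - min seg.length (n - used)) ['-', '-', '-']).flatten)
    :: btB_runs cds n rest (used + min seg.length (n - used))

def back_translate_alt (protein_alignment : List (String × String)) (cds_dict : List (String × String)) : List (String × String) :=
  (protein_alignment.foldl (fun (acc : PySem.Dict String String) p =>
      match (PySem.Dict.ofList cds_dict).get? p.1 with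
      | none => acc
      | some cds_seq =>
        acc.insert p.1 (String.ofList (PySem.Chars.join ['-', '-', '-']
          (btB_runs cds_seq.toList (cds_seq.toList.length / 3) (p.2.toList.splitOn '-') 0))))
    PySem.Dict.empty).items

-- ===== PRECONDITION & SPEC =====
def Spec_back_translate (protein_alignment : List (String × String)) (cds_dict : List (String × String)) (out : List (String × String)) : Prop := out = back_translate_alt protein_alignment cds_dict
instance (protein_alignment : List (String × String)) (cds_dict : List (String × String)) (out : List (String × String)) : Decidable (Spec_back_translate protein_alignment cds_dict out) := by unfold Spec_back_translate; infer_instance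

-- ===== CLAIM (what is proved, stated in full; the proofs are below) =====
def Claim_equal_back_translate : Prop := ∀ (protein_alignment : List (String × String)) (cds_dict : List (String × String)), Dom_back_translate protein_alignment cds_dict → Spec_back_translate protein_alignment cds_dict (back_translate protein_alignment cds_dict)

-- ===== LEMMAS AND PROOFS =====

-- elements of splitOnP satisfy ¬p pointwise
lemma mem_splitOnP_not (p : Char → Bool) (xs : List Char) :
    ∀ l ∈ xs.splitOnP p, ∀ c ∈ l, ¬ p c := by
  induction xs with
  | nil => intro l hl c hc; simp [List.splitOnP_nil] at hl; subst hl; simp at hc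
  | cons a xs ih =>
    intro l hl c hc
    rw [List.splitOnP_cons] at hl
    by_cases ha : p a
    · rw [if_pos ha] at hl
      rcases List.mem_cons.mp hl with hl | hl
      · subst hl; simp at hc
      · exact ih l hl c hc
    · rw [if_neg ha] at hl
      obtain ⟨h, t, he⟩ := List.exists_cons_of_ne_nil (List.splitOnP_ne_nil p xs)
      rw [he] at hl
      simp only [List.modifyHead_cons, List.mem_cons] at hl
      rcases hl with hl | hl
      · subst hl
        rcases List.mem_cons.mp hc with hc | hc
        · subst hc; exact ha
        · exact ih h (by rw [he]; exact List.mem_cons_self) c hc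
      · exact ih l (by rw [he]; exact List.mem_cons_of_mem _ hl) c hc

lemma mem_splitOn_ne (xs : List Char) :
    ∀ l ∈ xs.splitOn '-', ∀ c ∈ l, c ≠ '-' := by
  intro l hl c hc
  have := mem_splitOnP_not (· == '-') xs l hl c hc
  simpa using this

lemma intercalate_cons₂ {α : Type} (sep a b : List α) (l : List (List α)) :
    List.intercalate sep (a :: b :: l) = a ++ sep ++ List.intercalate sep (b :: l) := by
  simp [List.intercalate, List.flatten]

lemma intercalate_nil_sep {α : Type} : ∀ l : List (List α), List.intercalate ([] : List α) l = l.flatten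
  | [] => rfl
  | [a] => by simp [List.intercalate]
  | a :: b :: l => by
    rw [intercalate_cons₂, intercalate_nil_sep (b :: l)]
    simp

-- A's loop across one gap-free run: slices min(L, n-u) codons as one block, pads, continues
lemma btA_run (cds : List Char) (seg : List Char) :
    ∀ (rest : List Char) (u : Nat), (∀ c ∈ seg, c ≠ '-') →
      (btA_inner cds (seg ++ rest) (3 * (u : Int))).flatten =
        (cds.drop (3 * u)).take (3 * min seg.length (cds.length / 3 - u))
          ++ (List.replicate (seg.length - min seg.length (cds.length / 3 - u)) ['-', '-', '-']).flatten
          ++ (btA_inner cds rest (3 * ((u + min seg.length (cds.length / 3 - u) : Nat) : Int))).flatten := by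
  induction seg with
  | nil => intro rest u _; simp
  | cons c seg ih =>
    intro rest u hseg
    have hc : c ≠ '-' := hseg c List.mem_cons_self
    have hseg' : ∀ x ∈ seg, x ≠ '-' := fun x hx => hseg x (List.mem_cons_of_mem _ hx)
    by_cases hfit : 3 * (u : Int) + 3 ≤ (cds.length : Int)
    · have hun : u < cds.length / 3 := by omega
      have h1 : (3 * (u : Int)) = ((3 * u : Nat) : Int) := by push_cast; ring
      have h2 : (3 * (u : Int) + 3) = ((3 * u : Nat) : Int) + ((3 : Nat) : Int) := by push_cast; ring
      have hslice : PySem.List.slice cds (some (3 * (u : Int))) (some (3 * (u : Int) + 3))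
          = (cds.drop (3 * u)).take 3 := by
        rw [h2, h1, PySem.List.slice_natCast_add]
      have hrec : (3 * (u : Int) + 3) = 3 * (((u + 1 : Nat)) : Int) := by push_cast; ring
      simp only [List.cons_append, btA_inner, if_neg hc, if_pos hfit, List.flatten_cons]
      rw [hslice, hrec, ih rest (u + 1) hseg']
      have hmin : min (c :: seg).length (cds.length / 3 - u)
          = min seg.length (cds.length / 3 - (u + 1)) + 1 := by
        simp only [List.length_cons]; omega
      rw [hmin]
      have htake : (cds.drop (3 * u)).take (3 * (min seg.length (cds.length / 3 - (u + 1)) + 1))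
          = (cds.drop (3 * u)).take 3
            ++ (cds.drop (3 * (u + 1))).take (3 * min seg.length (cds.length / 3 - (u + 1))) := by
        have : 3 * (min seg.length (cds.length / 3 - (u + 1)) + 1)
            = 3 + 3 * min seg.length (cds.length / 3 - (u + 1)) := by ring
        rw [this, List.take_add, List.drop_drop]
        congr 2
      rw [htake]
      have hsub : (c :: seg).length - (min seg.length (cds.length / 3 - (u + 1)) + 1)
          = seg.length - min seg.length (cds.length / 3 - (u + 1)) := by
        simp only [List.length_cons]; omega
      rw [hsub]
      have hupos : u + (min seg.length (cds.length / 3 - (u + 1)) + 1)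
          = u + 1 + min seg.length (cds.length / 3 - (u + 1)) := by omega
      rw [hupos]
      simp [List.append_assoc]
    · have hun : cds.length / 3 - u = 0 := by omega
      simp only [List.cons_append, btA_inner, if_neg hc, if_neg hfit, List.flatten_cons]
      rw [ih rest u hseg']
      simp [hun, List.replicate_succ]

-- summing A's pieces over the split runs equals B's joined parts
lemma btA_eq_btB (cds : List Char) (segs : List (List Char)) :
    ∀ u : Nat, segs ≠ [] → (∀ s ∈ segs, ∀ c ∈ s, c ≠ '-') →
      (btA_inner cds (List.intercalate [ '-' ] segs) (3 * (u : Int))).flatten =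
        List.intercalate ['-', '-', '-'] (btB_runs cds (cds.length / 3) segs u) := by
  induction segs with
  | nil => intro u h _; exact absurd rfl h
  | cons s segs ih =>
    intro u _ hall
    have hs : ∀ c ∈ s, c ≠ '-' := hall s List.mem_cons_self
    have hslice : PySem.List.slice cds (some ((3 * u : Nat) : Int))
        (some ((3 * (u + min s.length (cds.length / 3 - u)) : Nat) : Int))
        = (cds.drop (3 * u)).take (3 * min s.length (cds.length / 3 - u)) := by
      have h2 : ((3 * (u + min s.length (cds.length / 3 - u)) : Nat) : Int)
          = ((3 * u : Nat) : Int) + ((3 * min s.length (cds.length / 3 - u) : Nat) : Int) := by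
        push_cast; ring
      rw [h2, PySem.List.slice_natCast_add]
    cases segs with
    | nil =>
      have h1 : List.intercalate [ '-' ] [s] = s := by simp [List.intercalate]
      rw [h1]
      have h2 := btA_run cds s [] u hs
      simp only [List.append_nil, btA_inner, List.flatten_nil] at h2
      rw [h2]
      have h3 : ∀ x : List Char, List.intercalate ['-', '-', '-'] [x] = x := by
        intro x; simp [List.intercalate]
      simp only [btB_runs]
      rw [h3, hslice]
    | cons s2 segs2 =>
      have hint : List.intercalate [ '-' ] (s :: s2 :: segs2)
          = s ++ ('-' :: List.intercalate [ '-' ] (s2 :: segs2)) := by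
        rw [intercalate_cons₂]; simp
      rw [hint, btA_run cds s ('-' :: List.intercalate [ '-' ] (s2 :: segs2)) u hs]
      simp only [btA_inner, if_true, List.flatten_cons]
      have hrec := ih (u + min s.length (cds.length / 3 - u)) (by simp)
        (fun t ht c hc => hall t (List.mem_cons_of_mem _ ht) c hc)
      rw [hrec]
      simp only [btB_runs]
      rw [intercalate_cons₂ ['-', '-', '-']]
      rw [hslice]
      simp [List.append_assoc]

-- the per-gene strings agree
lemma bt_inner_join_eq (cds prot : List Char) :
    PySem.Chars.join [] (btA_inner cds prot 0) =
      PySem.Chars.join ['-', '-', '-'] (btB_runs cds (cds.length / 3) (prot.splitOn '-') 0) := by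
  have h0 : (0 : Int) = 3 * ((0 : Nat) : Int) := by norm_num
  have hmain := btA_eq_btB cds (prot.splitOn '-') 0
    (by simpa [List.splitOn] using List.splitOnP_ne_nil (· == '-') prot)
    (mem_splitOn_ne prot)
  have hsp : List.intercalate [ '-' ] (prot.splitOn '-') = prot := by
    rw [List.intercalate_splitOn]
  calc PySem.Chars.join [] (btA_inner cds prot 0)
      = (btA_inner cds prot 0).flatten := by
        simp [PySem.Chars.join, intercalate_nil_sep]
    _ = (btA_inner cds (List.intercalate [ '-' ] (prot.splitOn '-')) (3 * ((0:Nat) : Int))).flatten := by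
        rw [hsp, ← h0]
    _ = List.intercalate ['-', '-', '-'] (btB_runs cds (cds.length / 3) (prot.splitOn '-') 0) := hmain
    _ = PySem.Chars.join ['-', '-', '-'] (btB_runs cds (cds.length / 3) (prot.splitOn '-') 0) := by
        simp [PySem.Chars.join]

-- ===== VERDICT (by name: the statement is the Claim_ definition above) =====
theorem back_translate_spec : Claim_equal_back_translate := by
  intro pa cd _
  unfold Spec_back_translate back_translate back_translate_alt
  have hf : (fun (acc : PySem.Dict String String) (p : String × String) =>
      match (PySem.Dict.ofList cd).get? p.1 with
      | none => acc
      | some cds_seq =>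
        acc.insert p.1 (String.ofList (PySem.Chars.join [] (btA_inner cds_seq.toList p.2.toList 0))))
      = (fun (acc : PySem.Dict String String) (p : String × String) =>
      match (PySem.Dict.ofList cd).get? p.1 with
      | none => acc
      | some cds_seq =>
        acc.insert p.1 (String.ofList (PySem.Chars.join ['-', '-', '-']
          (btB_runs cds_seq.toList (cds_seq.toList.length / 3) (p.2.toList.splitOn '-') 0)))) := by
    funext acc p
    cases h : (PySem.Dict.ofList cd).get? p.1 with
    | none => simp
    | some cds_seq => simp [bt_inner_join_eq]
  rw [hf]
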